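-- pv_equiv track=rewrite | github.com/rboltaboeva28/week4assignment | Assignments/week_6_assignment.py | get_category_popularity
-- ===== SOURCE A (Python) =====
-- def get_category_popularity(menu_data):
--     categories = {}
--     for dish in menu_data:
--         cat = dish[1]
--         ordered = dish[4]
--         if not cat in categories:
--             categories[cat] = 0
--         categories[cat] += ordered
--     output = []
--     for cat in categories:
--         output.append((cat, categories[cat]))
--     output.sort()
--     return output
-- ===== SOURCE B (Python) =====
-- def get_category_popularity(menu_data):
--     categories = sorted({dish[1] for dish in menu_data})
--     return [(cat, sum(dish[4] for dish in menu_data if dish[1] == cat))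
--             for cat in categories]
-- ===== Notes on version B (the rewrite author's own statement) =====
-- stated objective: simpler
-- what changed: Replaces the dict-aggregate-then-sort pair of loops with a two-line comprehension: iterate over the sorted set of distinct categories and compute each total by a direct filtered sum over the input.
import Mathlib
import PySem

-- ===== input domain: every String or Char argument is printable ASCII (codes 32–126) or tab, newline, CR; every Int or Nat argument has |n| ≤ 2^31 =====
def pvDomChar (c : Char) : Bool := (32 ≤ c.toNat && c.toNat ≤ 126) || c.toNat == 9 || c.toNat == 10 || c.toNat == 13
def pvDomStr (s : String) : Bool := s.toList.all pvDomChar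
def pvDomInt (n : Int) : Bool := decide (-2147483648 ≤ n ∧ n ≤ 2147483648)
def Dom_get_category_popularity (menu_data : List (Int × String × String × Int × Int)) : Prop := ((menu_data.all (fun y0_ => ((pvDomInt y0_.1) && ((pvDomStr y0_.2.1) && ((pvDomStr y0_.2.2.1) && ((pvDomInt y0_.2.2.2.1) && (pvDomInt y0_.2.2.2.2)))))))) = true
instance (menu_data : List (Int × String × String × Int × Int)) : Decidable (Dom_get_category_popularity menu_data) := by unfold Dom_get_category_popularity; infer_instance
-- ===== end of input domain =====

-- B replaces A's dict-aggregate-then-sort loops with a map over the sorted set of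
-- categories, each total computed by a direct filtered sum (objective: simpler).

-- ===== PORT A =====
-- the loop body of A: ensure the key exists with value 0, then add dish[4] to it
def pvStep (d : PySem.Dict String Int) (dish : Int × String × String × Int × Int) : PySem.Dict String Int :=
  let cat := dish.2.1
  let d1 := if d.contains cat then d else d.insert cat 0
  d1.insert cat (d1.getD cat 0 + dish.2.2.2.2)

def get_category_popularity (menu_data : List (Int × String × String × Int × Int)) : List (String × Int) :=
  let categories := menu_data.foldl pvStep PySem.Dict.empty
  let output := categories.keys.foldl (fun out cat => out ++ [(cat, categories.getD cat 0)]) []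
  PySem.List.sorted2 output (·.1) (·.2)

-- ===== PORT B =====
def get_category_popularity_alt (menu_data : List (Int × String × String × Int × Int)) : List (String × Int) :=
  let categories := PySem.List.sorted (PySem.Set.ofList (menu_data.map (·.2.1))) (fun x => x)
  categories.map (fun cat =>
    (cat, ((menu_data.filter (fun dish => dish.2.1 == cat)).map (·.2.2.2.2)).sum))

-- ===== PRECONDITION & SPEC =====
def Spec_get_category_popularity (menu_data : List (Int × String × String × Int × Int)) (out : List (String × Int)) : Prop := out = get_category_popularity_alt menu_data
instance (menu_data : List (Int × String × String × Int × Int)) (out : List (String × Int)) : Decidable (Spec_get_category_popularity menu_data out) := by unfold Spec_get_category_popularity; infer_instance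

-- ===== CLAIM (what is proved, stated in full; the proofs are below) =====
def Claim_equal_get_category_popularity : Prop := ∀ (menu_data : List (Int × String × String × Int × Int)), Dom_get_category_popularity menu_data → Spec_get_category_popularity menu_data (get_category_popularity menu_data)

-- ===== LEMMAS AND PROOFS =====

-- per-category total of dish[4] over a list of dishes
def pvSum (l : List (Int × String × String × Int × Int)) (k : String) : Int :=
  ((l.filter (fun dish => dish.2.1 == k)).map (·.2.2.2.2)).sum

theorem pvStep_keys (d : PySem.Dict String Int) (x : Int × String × String × Int × Int) :
    (pvStep d x).keys = PySem.Set.add d.keys x.2.1 := by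
  unfold pvStep
  by_cases h : d.contains x.2.1 = true
  · simp only [h, if_pos]
    rw [PySem.Dict.keys_insert_of_contains d _ h,
        PySem.Set.add_of_mem ((PySem.Dict.contains_iff_mem_keys d _).1 h)]
  · have h' : d.contains x.2.1 = false := by simpa using h
    simp only [h', Bool.false_eq_true, if_neg, not_false_iff]
    rw [PySem.Dict.keys_insert_of_contains _ _ (PySem.Dict.contains_insert_self d _ 0),
        PySem.Dict.keys_insert_of_not_contains d _ h',
        PySem.Set.add_of_not_mem (by
          intro hm
          exact absurd ((PySem.Dict.contains_iff_mem_keys d _).2 hm) (by simp [h']))]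

theorem pvFold_keys (l : List (Int × String × String × Int × Int)) (d : PySem.Dict String Int) :
    (l.foldl pvStep d).keys = PySem.Set.update d.keys (l.map (·.2.1)) := by
  induction l generalizing d with
  | nil => simp [PySem.Set.update_nil]
  | cons x l ih =>
      simp only [List.foldl_cons, List.map_cons, PySem.Set.update_cons]
      rw [ih, pvStep_keys]

theorem pvStep_getD (d : PySem.Dict String Int) (x : Int × String × String × Int × Int) (k : String) :
    (pvStep d x).getD k 0 = d.getD k 0 + (if x.2.1 = k then x.2.2.2.2 else 0) := by
  unfold pvStep
  have h1 : ∀ d1 : PySem.Dict String Int, (if d.contains x.2.1 then d else d.insert x.2.1 0) = d1 →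
      d1.getD x.2.1 0 = d.getD x.2.1 0 := by
    intro d1 hd1
    by_cases h : d.contains x.2.1 = true
    · simp only [h, if_pos] at hd1; rw [← hd1]
    · have h' : d.contains x.2.1 = false := by simpa using h
      simp only [h', Bool.false_eq_true, if_neg, not_false_iff] at hd1
      rw [← hd1, PySem.Dict.getD_insert_self, PySem.Dict.getD_of_not_contains d 0 h']
  by_cases hk : x.2.1 = k
  · subst hk
    rw [PySem.Dict.getD_insert_self, h1 _ rfl]
    simp
  · rw [PySem.Dict.getD_insert_of_ne _ _ _ (fun h => hk h.symm)]
    by_cases h : d.contains x.2.1 = true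
    · simp [h, hk]
    · have h' : d.contains x.2.1 = false := by simpa using h
      simp only [h', Bool.false_eq_true, if_neg, not_false_iff]
      rw [PySem.Dict.getD_insert_of_ne _ _ _ (fun h => hk h.symm)]
      simp [hk]

theorem pvFold_getD (l : List (Int × String × String × Int × Int)) (d : PySem.Dict String Int) (k : String) :
    (l.foldl pvStep d).getD k 0 = d.getD k 0 + pvSum l k := by
  induction l generalizing d with
  | nil => simp [pvSum]
  | cons x l ih =>
      simp only [List.foldl_cons]
      rw [ih, pvStep_getD]
      by_cases hk : x.2.1 = k
      · simp only [pvSum, List.filter_cons, hk, beq_self_eq_true, if_pos, List.map_cons, List.sum_cons]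
        ring
      · simp [pvSum, hk]

-- pairwise-≤-in-key is preserved by lexicographic insertion
theorem pvInsertBy_pairwise {α κ : Type} [LinearOrder κ] (key : α → κ) (before : α → α → Bool)
    (hT : ∀ a b, before a b = true → key a ≤ key b)
    (hF : ∀ a b, before a b = false → key b ≤ key a)
    (x : α) (ys : List α) (h : ys.Pairwise (fun a b => key a ≤ key b)) :
    (PySem.List.insertBy before x ys).Pairwise (fun a b => key a ≤ key b) := by
  induction ys with
  | nil => simp [PySem.List.insertBy]
  | cons y ys ih =>
      rw [PySem.List.insertBy.eq_2]
      rcases List.pairwise_cons.1 h with ⟨hy, hys⟩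
      by_cases hb : before x y = true
      · simp only [hb, if_pos]
        refine List.pairwise_cons.2 ⟨?_, h⟩
        intro z hz
        rcases List.mem_cons.1 hz with rfl | hz
        · exact hT _ _ hb
        · exact le_trans (hT _ _ hb) (hy z hz)
      · have hb' : before x y = false := by simpa using hb
        simp only [hb', Bool.false_eq_true, if_neg, not_false_iff]
        refine List.pairwise_cons.2 ⟨?_, ih hys⟩
        intro z hz
        rcases (PySem.List.insertBy_mem_iff before x z ys).1 hz with rfl | hz
        · exact hF _ _ hb'
        · exact hy z hz

theorem pvSorted2_pairwise (xs : List (String × Int)) :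
    (PySem.List.sorted2 xs (·.1) (·.2)).Pairwise (fun a b : String × Int => a.1 ≤ b.1) := by
  unfold PySem.List.sorted2
  simp only [if_neg (by decide : ¬ (false = true))]
  generalize hacc : ([] : List (String × Int)) = acc
  have hp : acc.Pairwise (fun a b : String × Int => a.1 ≤ b.1) := by rw [← hacc]; simp
  clear hacc
  induction xs generalizing acc with
  | nil => simpa using hp
  | cons x xs ih =>
      simp only [List.foldl_cons]
      refine ih _ ?_
      refine pvInsertBy_pairwise (·.1) _ ?_ ?_ x acc hp
      · intro a b h
        by_cases h1 : a.1 < b.1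
        · exact le_of_lt h1
        · simp only [decide_eq_true_eq, Bool.or_eq_true, Bool.and_eq_true, Bool.not_eq_true',
            decide_eq_false_iff_not] at h
          rcases h with h | ⟨h2, _⟩
          · exact le_of_lt h
          · exact not_lt.1 h2
      · intro a b h
        simp only [Bool.or_eq_false_iff, decide_eq_false_iff_not] at h
        exact not_lt.1 h.1

theorem get_category_popularity_eq_map (menu_data : List (Int × String × String × Int × Int)) :
    get_category_popularity menu_data =
      PySem.List.sorted2
        ((PySem.Set.ofList (menu_data.map (·.2.1))).map (fun k => (k, pvSum menu_data k)))
        (·.1) (·.2) := by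
  unfold get_category_popularity
  simp only [PySem.List.foldl_append_singleton_eq_map, List.nil_append]
  congr 1
  rw [pvFold_keys, PySem.Dict.keys_empty, PySem.Set.update_nil_left]
  apply List.map_congr_left
  intro k _
  rw [pvFold_getD, PySem.Dict.getD_empty, zero_add]

theorem get_category_popularity_spec : Claim_equal_get_category_popularity := by
  intro menu_data _
  unfold Spec_get_category_popularity
  rw [get_category_popularity_eq_map]
  unfold get_category_popularity_alt
  set M : List String := PySem.Set.ofList (menu_data.map (·.2.1)) with hM
  set g : String → String × Int := fun k => (k, pvSum menu_data k) with hg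
  have hL2 : (PySem.List.sorted M (fun x => x)).map g =
      (PySem.List.sorted M (fun x => x)).map
        (fun cat => (cat, ((menu_data.filter (fun dish => dish.2.1 == cat)).map (·.2.2.2.2)).sum)) := rfl
  rw [← hL2]
  -- both sides are key-sorted rearrangements of M.map g with keys determining elements
  have hperm : (PySem.List.sorted2 (M.map g) (·.1) (·.2)).Perm ((PySem.List.sorted M (fun x => x)).map g) :=
    (PySem.List.sorted2_perm (M.map g) _ _ false).trans
      ((PySem.List.sorted_perm M (fun x => x) false).map g).symm
  have hmem1 : ∀ a ∈ PySem.List.sorted2 (M.map g) (fun p => p.1) (fun p => p.2), a.2 = pvSum menu_data a.1 := by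
    intro a ha
    have : a ∈ M.map g := (PySem.List.sorted2_perm (M.map g) _ _ false).mem_iff.1 ha
    rcases List.mem_map.1 this with ⟨k, _, rfl⟩; rfl
  have hmem2 : ∀ a ∈ (PySem.List.sorted M (fun x => x)).map g, a.2 = pvSum menu_data a.1 := by
    intro a ha
    rcases List.mem_map.1 ha with ⟨k, _, rfl⟩; rfl
  refine List.Perm.eq_of_pairwise (le := fun a b : String × Int => a.1 ≤ b.1) ?_ ?_ ?_ hperm
  · intro a b ha hb h1 h2
    have hk : a.1 = b.1 := le_antisymm h1 h2
    have := hmem1 a ha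
    have := hmem2 b hb
    exact Prod.ext hk (by rw [hmem1 a ha, hmem2 b hb, hk])
  · exact pvSorted2_pairwise (M.map g)
  · have hlt : (PySem.List.sorted M (fun x => x)).Pairwise (fun a b : String => a < b) := by
      rw [hM]; exact PySem.List.sorted_ofList_pairwise_lt _
    exact (List.pairwise_map.2 (hlt.imp (fun h => le_of_lt h)))
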